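-- pv_equiv track=rewrite | github.com/khloe-r/techical-interview-practice | solutions/backtracking/day50.py | capitalizationPerms
-- ===== SOURCE A (Python) =====
-- def capitalizationPerms(str):
--   ans = [""]
--   for i in range(len(str)):
--     if str[i].isalpha():
--       l = len(ans)
--       for j in range(l):
--         ans.append(ans[j] + str[i].lower())
--         ans[j] += str[i].upper()
--     else:
--       for j in range(len(ans)):
--         ans[j] += str[i]
--   return ans
-- ===== SOURCE B (Python) =====
-- def capitalizationPerms(str):
--     k = sum(1 for c in str if c.isalpha())
--     res = []
--     for num in range(2 ** k):
--         out = []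
--         m = 0
--         for c in str:
--             if c.isalpha():
--                 out.append(c.lower() if (num >> m) & 1 else c.upper())
--                 m += 1
--             else:
--                 out.append(c)
--         res.append("".join(out))
--     return res
-- ===== Notes on version B (the rewrite author's own statement) =====
-- stated objective: alternative
-- what changed: B replaces A's in-place doubling of a result list (appending lowercase variants and mutating entries per character) by direct bitmask enumeration: it counts the k alphabetic characters and, for each num in range(2**k), builds the output string in one pass, choosing upper/lower case of the m-th letter from bit m of num.
import Mathlib
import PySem

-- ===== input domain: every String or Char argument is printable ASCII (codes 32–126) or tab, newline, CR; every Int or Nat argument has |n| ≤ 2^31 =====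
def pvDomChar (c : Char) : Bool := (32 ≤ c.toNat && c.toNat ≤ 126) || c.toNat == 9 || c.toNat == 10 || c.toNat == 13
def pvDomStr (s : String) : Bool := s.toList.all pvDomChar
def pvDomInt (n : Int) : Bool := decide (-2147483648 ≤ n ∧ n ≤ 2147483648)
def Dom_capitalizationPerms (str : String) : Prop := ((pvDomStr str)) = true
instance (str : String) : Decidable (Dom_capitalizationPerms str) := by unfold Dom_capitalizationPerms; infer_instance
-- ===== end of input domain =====

-- B enumerates the 2^k case choices as bitmasks and builds each output string in one
-- pass, instead of A's repeated in-place doubling of the result list (objective: alternative).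

-- ===== PORT A =====
-- body of A's non-alpha inner loop: ans[j] += str[i]
def pvStepOf (s : String) (a : List String) (j : Nat) : List String :=
  a.set j ((a.getD j "") ++ s)

-- body of A's alpha inner loop: ans.append(ans[j] + lower); ans[j] += upper
def pvStepAf (lo up : String) (a : List String) (j : Nat) : List String :=
  let a2 := a ++ [(a.getD j "") ++ lo]
  a2.set j ((a2.getD j "") ++ up)

-- one iteration of A's outer loop: the inner loops run over range(l) / range(len(ans))
def pvStepA (ans : List String) (c : Char) : List String :=
  if PySem.Chars.isalpha c then
    (List.range ans.length).foldl (pvStepAf (String.ofList [PySem.Chars.lowerChar c])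
      (String.ofList [PySem.Chars.upperChar c])) ans
  else
    (List.range ans.length).foldl (pvStepOf (String.ofList [c])) ans

def capitalizationPerms (str : String) : List String :=
  str.toList.foldl pvStepA [""]

-- ===== PORT B =====
-- the state (out, m) of Source B's inner `for c in str` loop
def pvBStep (num : Nat) (st : List Char × Nat) (c : Char) : List Char × Nat :=
  if PySem.Chars.isalpha c then
    (st.1 ++ [if (num >>> st.2) &&& 1 == 1 then PySem.Chars.lowerChar c
              else PySem.Chars.upperChar c], st.2 + 1)
  else (st.1 ++ [c], st.2)

-- range(2 ** k) ranges over the nonnegative integers 0 .. 2^k - 1, ported as List.range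
def capitalizationPerms_alt (str : String) : List String :=
  let k := str.toList.countP PySem.Chars.isalpha
  (List.range (2 ^ k)).map (fun num =>
    String.ofList (str.toList.foldl (pvBStep num) ([], 0)).1)

-- ===== PRECONDITION & SPEC =====
def Spec_capitalizationPerms (str : String) (out : List String) : Prop := out = capitalizationPerms_alt str
instance (str : String) (out : List String) : Decidable (Spec_capitalizationPerms str out) := by unfold Spec_capitalizationPerms; infer_instance

-- ===== CLAIM (what is proved, stated in full; the proofs are below) =====
def Claim_equal_capitalizationPerms : Prop := ∀ (str : String), Dom_capitalizationPerms str → Spec_capitalizationPerms str (capitalizationPerms str)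

-- ===== LEMMAS AND PROOFS =====
theorem pvStepOf_shift (s a0 : String) (r : List String) (j : Nat) :
    pvStepOf s (a0 :: r) (j + 1) = a0 :: pvStepOf s r j := by
  simp [pvStepOf]

theorem pvStepAf_shift (lo up a0 : String) (r : List String) (j : Nat) :
    pvStepAf lo up (a0 :: r) (j + 1) = a0 :: pvStepAf lo up r j := by
  simp [pvStepAf]

theorem pvFold_shift (f : List String → Nat → List String)
    (hf : ∀ (a0 : String) (r : List String) (j : Nat), f (a0 :: r) (j + 1) = a0 :: f r j) :
    ∀ (l : List Nat) (a0 : String) (r : List String),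
      (l.map (· + 1)).foldl f (a0 :: r) = a0 :: l.foldl f r := by
  intro l
  induction l with
  | nil => intro a0 r; simp
  | cons j rest ih => intro a0 r; simp [hf, ih]

theorem pvLoopO (s : String) : ∀ (ans extra : List String),
    (List.range ans.length).foldl (pvStepOf s) (ans ++ extra)
      = ans.map (· ++ s) ++ extra := by
  intro ans
  induction ans with
  | nil => intro extra; simp
  | cons a0 r ih =>
    intro extra
    rw [List.length_cons, List.range_succ_eq_map]
    rw [List.foldl_cons]
    have h0 : pvStepOf s (a0 :: (r ++ extra)) 0 = (a0 ++ s) :: (r ++ extra) := by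
      simp [pvStepOf]
    rw [List.cons_append, h0]
    rw [show (List.range r.length).map Nat.succ = (List.range r.length).map (· + 1) from rfl]
    rw [pvFold_shift _ (pvStepOf_shift s), ih extra]
    simp

theorem pvLoopA (lo up : String) : ∀ (ans extra : List String),
    (List.range ans.length).foldl (pvStepAf lo up) (ans ++ extra)
      = ans.map (· ++ up) ++ extra ++ ans.map (· ++ lo) := by
  intro ans
  induction ans with
  | nil => intro extra; simp
  | cons a0 r ih =>
    intro extra
    rw [List.length_cons, List.range_succ_eq_map]
    rw [List.foldl_cons]
    have h0 : pvStepAf lo up (a0 :: (r ++ extra)) 0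
        = (a0 ++ up) :: (r ++ (extra ++ [a0 ++ lo])) := by
      simp [pvStepAf]
    rw [List.cons_append, h0]
    rw [show (List.range r.length).map Nat.succ = (List.range r.length).map (· + 1) from rfl]
    rw [pvFold_shift _ (pvStepAf_shift lo up), ih (extra ++ [a0 ++ lo])]
    simp


def pvCount (cs : List Char) : Nat := cs.countP PySem.Chars.isalpha

def pvBspec (num : Nat) : Nat → List Char → List Char
  | _, [] => []
  | m, c :: rest =>
    if PySem.Chars.isalpha c then
      (if num.testBit m then PySem.Chars.lowerChar c else PySem.Chars.upperChar c)
        :: pvBspec num (m + 1) rest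
    else c :: pvBspec num m rest

theorem pvShift_eq_testBit (num m : Nat) : ((num >>> m) &&& 1 == 1) = num.testBit m := by
  simp [Nat.testBit]

theorem pvFoldB (num : Nat) : ∀ (cs : List Char) (out : List Char) (m : Nat),
    cs.foldl (pvBStep num) (out, m) = (out ++ pvBspec num m cs, m + pvCount cs) := by
  intro cs
  induction cs with
  | nil => intro out m; simp [pvBspec, pvCount]
  | cons c rest ih =>
    intro out m
    by_cases h : PySem.Chars.isalpha c
    · rw [List.foldl_cons, show pvBStep num (out, m) c
          = (out ++ [if (num >>> m) &&& 1 == 1 then PySem.Chars.lowerChar c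
                     else PySem.Chars.upperChar c], m + 1) from by simp [pvBStep, h], ih]
      rw [Prod.mk.injEq]
      constructor
      · rw [pvShift_eq_testBit]; simp [pvBspec, h]
      · simp [pvCount, h]; omega
    · rw [List.foldl_cons, show pvBStep num (out, m) c = (out ++ [c], m) from by
          simp [pvBStep, h], ih]
      rw [Prod.mk.injEq]
      constructor
      · simp [pvBspec, h]
      · simp [pvCount, h]

theorem pvBspec_append (num : Nat) : ∀ (cs ds : List Char) (m : Nat),
    pvBspec num m (cs ++ ds) = pvBspec num m cs ++ pvBspec num (m + pvCount cs) ds := by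
  intro cs
  induction cs with
  | nil => intro ds m; simp [pvBspec, pvCount]
  | cons c rest ih =>
    intro ds m
    by_cases h : PySem.Chars.isalpha c
    · have : m + pvCount (c :: rest) = (m + 1) + pvCount rest := by
        simp [pvCount, h]; omega
      simp only [List.cons_append, pvBspec, h, if_true, ih, this]
    · have : m + pvCount (c :: rest) = m + pvCount rest := by
        simp [pvCount, h]
      simp only [List.cons_append, pvBspec, h, ih, this]
      simp

theorem pvBspec_congr : ∀ (cs : List Char) (m num num' : Nat),
    (∀ j, m ≤ j → j < m + pvCount cs → num.testBit j = num'.testBit j) →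
    pvBspec num m cs = pvBspec num' m cs := by
  intro cs
  induction cs with
  | nil => intro m num num' _; simp [pvBspec]
  | cons c rest ih =>
    intro m num num' h
    by_cases hc : PySem.Chars.isalpha c
    · have hcnt : pvCount (c :: rest) = pvCount rest + 1 := by
        simp [pvCount, hc]
      rw [hcnt] at h
      simp only [pvBspec, hc, if_true]
      rw [h m (le_refl m) (by omega), ih (m + 1) num num'
        (fun j hj1 hj2 => h j (by omega) (by omega))]
    · have hcnt : pvCount (c :: rest) = pvCount rest := by
        simp [pvCount, hc]
      rw [hcnt] at h
      simp only [pvBspec, hc, Bool.false_eq_true, if_false]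
      rw [ih m num num' h]


theorem pvTestBit_high (K r : Nat) (h : r < 2 ^ K) : (2 ^ K + r).testBit K = true := by
  rw [Nat.testBit_two_pow_add_eq, Nat.testBit_lt_two_pow h]; rfl

theorem pvMain : ∀ cs : List Char,
    cs.foldl pvStepA [""]
      = (List.range (2 ^ pvCount cs)).map (fun num => String.ofList (pvBspec num 0 cs)) := by
  intro cs
  induction cs using List.reverseRecOn with
  | nil => simp [pvCount, pvBspec]
  | append_singleton cs c ih =>
    rw [List.foldl_append, List.foldl_cons, List.foldl_nil, ih]
    by_cases hc : PySem.Chars.isalpha c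
    · have hcnt : pvCount (cs ++ [c]) = pvCount cs + 1 := by
        simp [pvCount, List.countP_append, hc]
      rw [pvStepA, if_pos hc, ← List.append_nil
        (List.map (fun num => String.ofList (pvBspec num 0 cs)) (List.range (2 ^ pvCount cs)))]
      rw [show ((List.map (fun num => String.ofList (pvBspec num 0 cs))
          (List.range (2 ^ pvCount cs))) ++ ([] : List String)).length
          = (List.map (fun num => String.ofList (pvBspec num 0 cs))
            (List.range (2 ^ pvCount cs))).length from by simp]
      rw [pvLoopA]
      rw [hcnt, pow_succ, mul_two, List.range_add]
      rw [List.map_append, List.map_map, List.map_map, List.map_map]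
      simp only [List.append_nil]
      congr 1
      · apply List.map_congr_left
        intro num hnum
        have hlt : num < 2 ^ pvCount cs := List.mem_range.mp hnum
        simp only [Function.comp]
        rw [pvBspec_append, Nat.zero_add]
        simp [pvBspec, hc, Nat.testBit_lt_two_pow hlt]
      · apply List.map_congr_left
        intro r hr
        have hlt : r < 2 ^ pvCount cs := List.mem_range.mp hr
        simp only [Function.comp]
        rw [pvBspec_append, Nat.zero_add]
        have hlow : pvBspec (2 ^ pvCount cs + r) 0 cs = pvBspec r 0 cs := by
          apply pvBspec_congr
          intro j _ hj
          exact Nat.testBit_two_pow_add_gt (by omega) r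
        rw [hlow]
        simp [pvBspec, hc, pvTestBit_high _ _ hlt]
    · have hcnt : pvCount (cs ++ [c]) = pvCount cs := by
        simp [pvCount, List.countP_append, hc]
      rw [pvStepA, if_neg hc, ← List.append_nil
        (List.map (fun num => String.ofList (pvBspec num 0 cs)) (List.range (2 ^ pvCount cs)))]
      rw [show ((List.map (fun num => String.ofList (pvBspec num 0 cs))
          (List.range (2 ^ pvCount cs))) ++ ([] : List String)).length
          = (List.map (fun num => String.ofList (pvBspec num 0 cs))
            (List.range (2 ^ pvCount cs))).length from by simp]
      rw [pvLoopO, hcnt, List.map_map]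
      simp only [List.append_nil]
      apply List.map_congr_left
      intro num _
      simp only [Function.comp]
      rw [pvBspec_append, Nat.zero_add]
      simp [pvBspec, hc]

-- ===== VERDICT (by name: the statement is the Claim_ definition above) =====
theorem capitalizationPerms_spec : Claim_equal_capitalizationPerms := by
  intro str _
  unfold Spec_capitalizationPerms capitalizationPerms capitalizationPerms_alt
  rw [pvMain]
  apply List.map_congr_left
  intro num _
  rw [pvFoldB]
  simp
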